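-- pv_equiv track=rewrite | github.com/pkoi5088/CodeFestival | Section 2/Q95.py | solution
-- ===== SOURCE A (Python) =====
-- def rotate(stamp):
--     N=len(stamp)
--     ret=[[0 for _ in range(N)] for _ in range(N)]
--     for i in range(N):
--         for j in range(N):
--             ret[j][N-i-1]=stamp[i][j]
--     return ret
--
-- def solution(stamp,r):
--     N=len(stamp)
--     ret=stamp
--     tmp=stamp
--     while r:
--         tmp=rotate(tmp)
--         for i in range(N):
--             for j in range(N):
--                 ret[i][j]+=tmp[i][j]
--         r-=1
--     return ret
-- ===== SOURCE B (Python) =====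
-- def solution(stamp, r):
--     N = len(stamp)
--     m1 = [list(row) for row in zip(*stamp[::-1])]
--     m2 = [list(row) for row in zip(*m1[::-1])]
--     m3 = [list(row) for row in zip(*m2[::-1])]
--     q, s = divmod(r, 4)
--     return [[stamp[i][j]
--              + q * (stamp[i][j] + m1[i][j] + m2[i][j] + m3[i][j])
--              + (m1[i][j] if s >= 1 else 0)
--              + (m2[i][j] if s >= 2 else 0)
--              + (m3[i][j] if s >= 3 else 0)
--              for j in range(N)] for i in range(N)]
-- ===== Notes on version B (the rewrite author's own statement) =====
-- stated objective: faster
-- what changed: B replaces A's r-round rotate-and-accumulate loop by precomputing the three non-trivial rotations once (rotation has period 4) and adding r//4 copies of the full cycle plus the first r%4 rotations in one pass; Pre_ restricts to square matrices and r >= 0: A never terminates for r < 0, raises IndexError on a row shorter than N, and on non-square input with longer rows its untouched tail columns are an accident of mutating only the first N entries in place.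
-- outside the precondition, e.g. on solution([[1, 2]], 0): A returns [[1, 2]], B returns [[1]]; on solution([[1, 2, 3], [4, 5, 6]], 1): A returns [[5, 3, 3], [9, 7, 6]], B returns [[5, 3], [9, 7]]
import Mathlib
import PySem

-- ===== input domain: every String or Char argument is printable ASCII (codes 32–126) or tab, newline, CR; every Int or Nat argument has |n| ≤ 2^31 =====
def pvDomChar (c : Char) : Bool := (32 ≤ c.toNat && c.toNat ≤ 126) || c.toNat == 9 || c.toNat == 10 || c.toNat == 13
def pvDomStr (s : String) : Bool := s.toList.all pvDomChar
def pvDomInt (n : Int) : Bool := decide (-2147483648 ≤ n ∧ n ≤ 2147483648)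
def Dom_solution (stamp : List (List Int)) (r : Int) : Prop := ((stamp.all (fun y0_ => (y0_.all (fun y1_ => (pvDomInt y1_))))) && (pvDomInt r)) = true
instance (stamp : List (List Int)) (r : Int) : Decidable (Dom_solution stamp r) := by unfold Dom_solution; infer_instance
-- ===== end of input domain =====

-- B precomputes the three non-trivial 90° rotations once (rotation has period 4) and adds
-- r//4 copies of the full cycle plus the first r%4 rotations in one pass (asymptotically faster).
-- NOTE: Python A mutates `stamp` in place (ret aliases stamp); the equivalence proved here is
-- about the RETURN value only (B does not mutate).

-- ===== PORT A =====
-- m[i][j], as A reads it (indices are in range under Pre_, where getD is exact)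
def cell (m : List (List Int)) (i j : Nat) : Int := (m.getD i []).getD j 0

-- rotate(stamp): build an N×N zero matrix, then ret[j][N-i-1] = stamp[i][j]
def rotateA (m : List (List Int)) : List (List Int) :=
  let N := m.length
  (List.range N).foldl
    (fun ret i => (List.range N).foldl
      (fun ret j => ret.set j ((ret.getD j []).set (N - i - 1) (cell m i j))) ret)
    (List.replicate N (List.replicate N 0))

-- the nested `ret[i][j] += tmp[i][j]` loops
def addLoopA (N : Nat) (ret tmp : List (List Int)) : List (List Int) :=
  (List.range N).foldl
    (fun ret i => (List.range N).foldl
      (fun ret j => ret.set i ((ret.getD i []).set j (cell ret i j + cell tmp i j))) ret)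
    ret

-- `while r: tmp = rotate(tmp); add; r -= 1`, counted by r.toNat (for r < 0 Python diverges; excluded by Pre_)
def solLoopA (N : Nat) : Nat → List (List Int) → List (List Int) → List (List Int)
  | 0, ret, _ => ret
  | Nat.succ k, ret, tmp =>
    let tmp' := rotateA tmp
    solLoopA N k (addLoopA N ret tmp') tmp'

def solution (stamp : List (List Int)) (r : Int) : List (List Int) :=
  solLoopA stamp.length r.toNat stamp stamp

-- ===== PORT B =====
-- zip(*m): exact port of Python zip over a list of rows (stops at the shortest row)
def zipStar (m : List (List Int)) : List (List Int) :=
  if h : m ≠ [] ∧ ∀ row ∈ m, row ≠ [] then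
    m.map (fun row => row.headD 0) :: zipStar (m.map List.tail)
  else []
termination_by (m.headD []).length
decreasing_by
  obtain ⟨hne, hall⟩ := h
  cases m with
  | nil => exact absurd rfl hne
  | cons a t =>
    have ha : a ≠ [] := hall a (by simp)
    cases a with
    | nil => exact absurd rfl ha
    | cons x xs => simp

-- [list(row) for row in zip(*m[::-1])]
def zrotB (m : List (List Int)) : List (List Int) := zipStar m.reverse

def solution_alt (stamp : List (List Int)) (r : Int) : List (List Int) :=
  let N := stamp.length
  let m1 := zrotB stamp
  let m2 := zrotB m1
  let m3 := zrotB m2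
  let q := PySem.Int.floordiv r 4
  let s := PySem.Int.mod r 4
  (List.range N).map (fun i =>
    (List.range N).map (fun j =>
      (stamp.getD i []).getD j 0
        + q * ((stamp.getD i []).getD j 0 + (m1.getD i []).getD j 0
               + (m2.getD i []).getD j 0 + (m3.getD i []).getD j 0)
        + (if 1 ≤ s then (m1.getD i []).getD j 0 else 0)
        + (if 2 ≤ s then (m2.getD i []).getD j 0 else 0)
        + (if 3 ≤ s then (m3.getD i []).getD j 0 else 0)))

-- ===== PRECONDITION & SPEC =====
-- Pre_ excludes r < 0 (A's `while r` loop never terminates), matrices with a row shorter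
-- than N (A raises IndexError in rotate/add), and non-square matrices with over-long rows,
-- where A's untouched columns beyond N are an accident of its in-place mutation of only the
-- first N entries of each row — the task's stamp is an N×N matrix.
def Pre_solution (stamp : List (List Int)) (r : Int) : Prop :=
  0 ≤ r ∧ ∀ row ∈ stamp, row.length = stamp.length
instance (stamp : List (List Int)) (r : Int) : Decidable (Pre_solution stamp r) := by
  unfold Pre_solution; infer_instance

def pvWitness_solution : List (List Int) × Int := ([[1, 2], [3, 4]], 5)

def Spec_solution (stamp : List (List Int)) (r : Int) (out : List (List Int)) : Prop := out = solution_alt stamp r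
instance (stamp : List (List Int)) (r : Int) (out : List (List Int)) : Decidable (Spec_solution stamp r out) := by unfold Spec_solution; infer_instance

-- ===== CLAIM (what is proved, stated in full; the proofs are below) =====
def Claim_equal_solution : Prop := ∀ (stamp : List (List Int)) (r : Int), Dom_solution stamp r → Pre_solution stamp r → Spec_solution stamp r (solution stamp r)

-- ===== LEMMAS AND PROOFS =====

lemma getD_set_self (l : List Int) (n : Nat) (a d : Int) (h : n < l.length) :
    (l.set n a).getD n d = a := by
  simp [List.getD, List.getElem?_set_self, h]

lemma getD_set_ne (l : List Int) {n m : Nat} (a : Int) (d : Int) (h : n ≠ m) :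
    (l.set n a).getD m d = l.getD m d := by
  simp [List.getD, List.getElem?_set_ne h]

lemma getDl_set_self (l : List (List Int)) (n : Nat) (a d : List Int) (h : n < l.length) :
    (l.set n a).getD n d = a := by
  simp [List.getD, List.getElem?_set_self, h]

lemma getDl_set_ne (l : List (List Int)) {n m : Nat} (a d : List Int) (h : n ≠ m) :
    (l.set n a).getD m d = l.getD m d := by
  simp [List.getD, List.getElem?_set_ne h]

lemma rotInner (m : List (List Int)) (N i : Nat) (hi : i < N) :
    ∀ (k : Nat), k ≤ N → ∀ (ret : List (List Int)), ret.length = N →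
      (∀ a, a < N → (ret.getD a []).length = N) →
      ((List.range k).foldl
          (fun ret j => ret.set j ((ret.getD j []).set (N - i - 1) (cell m i j))) ret).length = N ∧
      (∀ a, a < N →
        (((List.range k).foldl
          (fun ret j => ret.set j ((ret.getD j []).set (N - i - 1) (cell m i j))) ret).getD a []).length = N) ∧
      (∀ a b,
        cell ((List.range k).foldl
          (fun ret j => ret.set j ((ret.getD j []).set (N - i - 1) (cell m i j))) ret) a b
        = if a < k ∧ b = N - i - 1 then cell m i a else cell ret a b) := by
  intro k
  induction k with
  | zero =>
    intro _ ret hl hr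
    simp only [List.range_zero, List.foldl_nil]
    refine ⟨hl, hr, ?_⟩
    intro a b
    simp
  | succ k ih =>
    intro hk ret hl hr
    have hk' : k ≤ N := by omega
    obtain ⟨ol, orr, oc⟩ := ih hk' ret hl hr
    set out := (List.range k).foldl
      (fun ret j => ret.set j ((ret.getD j []).set (N - i - 1) (cell m i j))) ret with hout
    have hstep : (List.range (k+1)).foldl
        (fun ret j => ret.set j ((ret.getD j []).set (N - i - 1) (cell m i j))) ret
        = out.set k ((out.getD k []).set (N - i - 1) (cell m i k)) := by
      rw [List.range_succ, List.foldl_append]; rfl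
    rw [hstep]
    have hkN : k < N := by omega
    have hcN : N - i - 1 < N := by omega
    refine ⟨by simp [ol], ?_, ?_⟩
    · intro a ha
      by_cases hak : a = k
      · subst hak
        rw [getDl_set_self _ _ _ _ (by omega), List.length_set]
        exact orr a ha
      · rw [getDl_set_ne _ _ _ (fun h => hak h.symm)]
        exact orr a ha
    · intro a b
      by_cases hak : a = k
      · subst hak
        unfold cell
        rw [getDl_set_self _ _ _ _ (by omega)]
        by_cases hbc : b = N - i - 1
        · subst hbc
          rw [getD_set_self _ _ _ _ (by rw [orr a hkN]; omega)]
          simp [cell]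
        · rw [getD_set_ne _ _ _ (fun h => hbc h.symm)]
          have := oc a b
          simp only [cell] at this
          rw [this]
          simp [hbc]
      · unfold cell
        rw [getDl_set_ne _ _ _ (fun h => hak h.symm)]
        have := oc a b
        simp only [cell] at this
        rw [this]
        by_cases h1 : a < k
        · simp [h1, show a < k + 1 by omega]
        · have : ¬ a < k + 1 := by omega
          simp [h1, this]

def Rspec (m : List (List Int)) : List (List Int) :=
  (List.range m.length).map (fun a => (List.range m.length).map (fun b => cell m (m.length - 1 - b) a))

lemma getD_range_map {α : Type} (N : Nat) (f : Nat → α) (d : α) {i : Nat} (hi : i < N) :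
    ((List.range N).map f).getD i d = f i := by
  rw [List.getD_eq_getElem _ _ (by simpa using hi)]
  simp

lemma row_Rspec (m : List (List Int)) {a : Nat} (ha : a < m.length) :
    (Rspec m).getD a [] = (List.range m.length).map (fun b => cell m (m.length - 1 - b) a) := by
  unfold Rspec
  exact getD_range_map _ _ _ ha

lemma cell_Rspec (m : List (List Int)) {a b : Nat} (ha : a < m.length) (hb : b < m.length) :
    cell (Rspec m) a b = cell m (m.length - 1 - b) a := by
  unfold cell
  rw [row_Rspec m ha, getD_range_map _ _ _ hb]
  rfl

lemma rotOuter (m : List (List Int)) :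
    ∀ (k : Nat), k ≤ m.length →
      let N := m.length
      let out := (List.range k).foldl
        (fun ret i => (List.range N).foldl
          (fun ret j => ret.set j ((ret.getD j []).set (N - i - 1) (cell m i j))) ret)
        (List.replicate N (List.replicate N 0))
      out.length = N ∧ (∀ a, a < N → (out.getD a []).length = N) ∧
      (∀ a b, a < N → b < N →
        cell out a b = if N - k ≤ b then cell m (m.length - 1 - b) a else 0) := by
  intro k
  induction k with
  | zero =>
    intro _
    refine ⟨by simp, ?_, ?_⟩
    · intro a ha
      rw [List.getD_eq_getElem _ _ (by simpa using ha)]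
      simp
    · intro a b ha hb
      have hc0 : ¬ m.length - 0 ≤ b := by omega
      have h1 : (List.replicate m.length (List.replicate m.length (0:Int))).getD a []
          = List.replicate m.length 0 := by
        rw [List.getD_eq_getElem _ _ (by simpa using ha)]; simp
      simp only [List.range_zero, List.foldl_nil, hc0, if_false, cell, h1]
      rw [List.getD_eq_getElem _ _ (by simpa using hb)]
      simp
  | succ k ih =>
    intro hk
    have hk' : k ≤ m.length := by omega
    obtain ⟨ol, orr, oc⟩ := ih hk'
    set N := m.length with hN
    set out := (List.range k).foldl
      (fun ret i => (List.range N).foldl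
        (fun ret j => ret.set j ((ret.getD j []).set (N - i - 1) (cell m i j))) ret)
      (List.replicate N (List.replicate N 0)) with hout
    have hstep : (List.range (k+1)).foldl
        (fun ret i => (List.range N).foldl
          (fun ret j => ret.set j ((ret.getD j []).set (N - i - 1) (cell m i j))) ret)
        (List.replicate N (List.replicate N 0))
      = (List.range N).foldl
          (fun ret j => ret.set j ((ret.getD j []).set (N - k - 1) (cell m k j))) out := by
      rw [List.range_succ, List.foldl_append]; rfl
    have hkN : k < N := by omega
    obtain ⟨il, irr, ic⟩ := rotInner m N k hkN N le_rfl out ol orr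
    simp only [hstep]
    refine ⟨il, irr, ?_⟩
    intro a b ha hb
    rw [ic a b]
    by_cases hbc : b = N - k - 1
    · subst hbc
      have h1 : N - (k+1) ≤ N - k - 1 := by omega
      have h2 : N - 1 - (N - k - 1) = k := by omega
      simp [ha, h1, h2]
    · have : ¬ (a < N ∧ b = N - k - 1) := by tauto
      rw [if_neg this, oc a b ha hb]
      have : (N - k ≤ b) ↔ (N - (k+1) ≤ b) := by omega
      rw [if_congr this rfl rfl]

lemma matExt {m n : List (List Int)} (hl : m.length = n.length)
    (hr : ∀ i, i < m.length → (m.getD i []).length = (n.getD i []).length)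
    (hc : ∀ i j, i < m.length → j < (m.getD i []).length → cell m i j = cell n i j) :
    m = n := by
  apply List.ext_getElem hl
  intro i h1 h2
  have hgd : m.getD i [] = m[i] := List.getD_eq_getElem m [] h1
  have hgd' : n.getD i [] = n[i] := List.getD_eq_getElem n [] h2
  have hlen : m[i].length = n[i].length := by rw [← hgd, ← hgd']; exact hr i h1
  apply List.ext_getElem hlen
  intro j j1 j2
  have := hc i j h1 (by rwa [hgd])
  simp only [cell, hgd, hgd'] at this
  rwa [List.getD_eq_getElem _ _ j1, List.getD_eq_getElem _ _ j2] at this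

lemma length_Rspec (m : List (List Int)) : (Rspec m).length = m.length := by simp [Rspec]

lemma rotateA_eq (m : List (List Int)) : rotateA m = Rspec m := by
  obtain ⟨ol, orr, oc⟩ := rotOuter m m.length le_rfl
  apply matExt
  · rw [show rotateA m = (List.range m.length).foldl
      (fun ret i => (List.range m.length).foldl
        (fun ret j => ret.set j ((ret.getD j []).set (m.length - i - 1) (cell m i j))) ret)
      (List.replicate m.length (List.replicate m.length 0)) from rfl]
    rw [ol, length_Rspec]
  · intro i hi
    rw [show rotateA m = (List.range m.length).foldl
      (fun ret i => (List.range m.length).foldl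
        (fun ret j => ret.set j ((ret.getD j []).set (m.length - i - 1) (cell m i j))) ret)
      (List.replicate m.length (List.replicate m.length 0)) from rfl] at hi ⊢
    rw [ol] at hi
    rw [orr i hi, row_Rspec m hi]
    simp
  · intro i j hi hj
    rw [show rotateA m = (List.range m.length).foldl
      (fun ret i => (List.range m.length).foldl
        (fun ret j => ret.set j ((ret.getD j []).set (m.length - i - 1) (cell m i j))) ret)
      (List.replicate m.length (List.replicate m.length 0)) from rfl] at hi hj ⊢
    rw [ol] at hi
    rw [orr i hi] at hj
    rw [oc i j hi hj, cell_Rspec m hi hj]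
    simp

-- square accumulation: out[i][j] = ret[i][j] + f i j on the N×N grid
def addMap (N : Nat) (ret : List (List Int)) (f : Nat → Nat → Int) : List (List Int) :=
  (List.range N).map (fun i => (List.range N).map (fun j => cell ret i j + f i j))

lemma row_addMap (N : Nat) (ret : List (List Int)) (f : Nat → Nat → Int) {i : Nat} (hi : i < N) :
    (addMap N ret f).getD i [] = (List.range N).map (fun j => cell ret i j + f i j) := by
  unfold addMap
  exact getD_range_map _ _ _ hi

lemma length_addMap (N : Nat) (ret : List (List Int)) (f : Nat → Nat → Int) :
    (addMap N ret f).length = N := by simp [addMap]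

lemma rlen_addMap (N : Nat) (ret : List (List Int)) (f : Nat → Nat → Int) {i : Nat} (hi : i < N) :
    ((addMap N ret f).getD i []).length = N := by
  rw [row_addMap N ret f hi]; simp

lemma cell_addMap (N : Nat) (ret : List (List Int)) (f : Nat → Nat → Int) {i j : Nat}
    (hi : i < N) (hj : j < N) :
    cell (addMap N ret f) i j = cell ret i j + f i j := by
  unfold cell
  rw [row_addMap N ret f hi, getD_range_map _ _ _ hj]
  rfl

lemma addInner (N : Nat) (tmp : List (List Int)) (i : Nat) (hi : i < N) :
    ∀ (k : Nat), k ≤ N → ∀ (ret : List (List Int)), ret.length = N →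
      (N ≤ (ret.getD i []).length) →
      ((List.range k).foldl
        (fun ret j => ret.set i ((ret.getD i []).set j (cell ret i j + cell tmp i j))) ret).length = N ∧
      (∀ a, (((List.range k).foldl
        (fun ret j => ret.set i ((ret.getD i []).set j (cell ret i j + cell tmp i j))) ret).getD a []).length
          = (ret.getD a []).length) ∧
      (∀ a b, cell ((List.range k).foldl
        (fun ret j => ret.set i ((ret.getD i []).set j (cell ret i j + cell tmp i j))) ret) a b
        = if a = i ∧ b < k then cell ret a b + cell tmp a b else cell ret a b) := by
  intro k
  induction k with
  | zero =>
    intro _ ret hl hr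
    refine ⟨hl, fun a => rfl, fun a b => by simp⟩
  | succ k ih =>
    intro hk ret hl hr
    have hk' : k ≤ N := by omega
    obtain ⟨ol, orr, oc⟩ := ih hk' ret hl hr
    set out := (List.range k).foldl
      (fun ret j => ret.set i ((ret.getD i []).set j (cell ret i j + cell tmp i j))) ret with hout
    have hstep : (List.range (k+1)).foldl
        (fun ret j => ret.set i ((ret.getD i []).set j (cell ret i j + cell tmp i j))) ret
        = out.set i ((out.getD i []).set k (cell out i k + cell tmp i k)) := by
      rw [List.range_succ, List.foldl_append]; rfl
    rw [hstep]
    have hkN : k < N := by omega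
    have hrli : (out.getD i []).length = (ret.getD i []).length := orr i
    have hvk : cell out i k = cell ret i k := by rw [oc]; simp
    refine ⟨by simp [ol], ?_, ?_⟩
    · intro a
      by_cases hai : a = i
      · subst hai
        rw [getDl_set_self _ _ _ _ (by omega), List.length_set, hrli]
      · rw [getDl_set_ne _ _ _ (fun h => hai h.symm), orr a]
    · intro a b
      by_cases hai : a = i
      · subst hai
        unfold cell
        rw [getDl_set_self _ _ _ _ (by omega)]
        by_cases hbk : b = k
        · subst hbk
          rw [getD_set_self _ _ _ _ (by omega)]
          have := hvk
          unfold cell at this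
          rw [this]
          simp [cell]
        · rw [getD_set_ne _ _ _ (fun h => hbk h.symm)]
          have := oc a b
          unfold cell at this
          rw [this]
          by_cases hb1 : b < k
          · simp [hb1, show b < k + 1 by omega]
          · simp [hb1, show ¬ b < k + 1 by omega]
      · unfold cell
        rw [getDl_set_ne _ _ _ (fun h => hai h.symm)]
        have := oc a b
        unfold cell at this
        rw [this]
        simp [hai]

lemma addOuter (N : Nat) (tmp : List (List Int)) :
    ∀ (k : Nat), k ≤ N → ∀ (ret : List (List Int)), ret.length = N →
      (∀ a, a < N → N ≤ (ret.getD a []).length) →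
      ((List.range k).foldl
        (fun ret i => (List.range N).foldl
          (fun ret j => ret.set i ((ret.getD i []).set j (cell ret i j + cell tmp i j))) ret) ret).length = N ∧
      (∀ a, (((List.range k).foldl
        (fun ret i => (List.range N).foldl
          (fun ret j => ret.set i ((ret.getD i []).set j (cell ret i j + cell tmp i j))) ret) ret).getD a []).length
          = (ret.getD a []).length) ∧
      (∀ a b, cell ((List.range k).foldl
        (fun ret i => (List.range N).foldl
          (fun ret j => ret.set i ((ret.getD i []).set j (cell ret i j + cell tmp i j))) ret) ret) a b
        = if a < k ∧ b < N then cell ret a b + cell tmp a b else cell ret a b) := by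
  intro k
  induction k with
  | zero =>
    intro _ ret hl hr
    refine ⟨hl, fun a => rfl, fun a b => by simp⟩
  | succ k ih =>
    intro hk ret hl hr
    have hk' : k ≤ N := by omega
    obtain ⟨ol, orr, oc⟩ := ih hk' ret hl hr
    set out := (List.range k).foldl
      (fun ret i => (List.range N).foldl
        (fun ret j => ret.set i ((ret.getD i []).set j (cell ret i j + cell tmp i j))) ret) ret with hout
    have hstep : (List.range (k+1)).foldl
        (fun ret i => (List.range N).foldl
          (fun ret j => ret.set i ((ret.getD i []).set j (cell ret i j + cell tmp i j))) ret) ret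
        = (List.range N).foldl
          (fun ret j => ret.set k ((ret.getD k []).set j (cell ret k j + cell tmp k j))) out := by
      rw [List.range_succ, List.foldl_append]; rfl
    rw [hstep]
    have hkN : k < N := by omega
    obtain ⟨il, irr, ic⟩ := addInner N tmp k hkN N le_rfl out ol (by rw [orr k]; exact hr k hkN)
    refine ⟨il, ?_, ?_⟩
    · intro a
      rw [irr a, orr a]
    · intro a b
      rw [ic a b]
      by_cases hbN : b < N
      · by_cases hak : a = k
        · have h1 : cell out k b = cell ret k b := by rw [oc]; simp
          have h2 : a < k + 1 := by omega
          simp [hak, hbN, h1, h2]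
        · by_cases ha : a < k
          · simp [hak, hbN, oc, ha, show a < k + 1 by omega]
          · simp [hak, hbN, oc, ha, show ¬ a < k + 1 by omega]
      · simp [hbN, oc]

def Sq (m : List (List Int)) (N : Nat) : Prop :=
  m.length = N ∧ ∀ i, i < N → (m.getD i []).length = N

lemma addLoopA_eq (N : Nat) (ret tmp : List (List Int)) (h : Sq ret N) :
    addLoopA N ret tmp = addMap N ret (fun i j => cell tmp i j) := by
  obtain ⟨hl, hr0⟩ := h
  have hr : ∀ i, i < N → N ≤ (ret.getD i []).length := fun i hi => (hr0 i hi).ge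
  obtain ⟨ol, orr, oc⟩ := addOuter N tmp N le_rfl ret hl hr
  have hshow : addLoopA N ret tmp = (List.range N).foldl
      (fun ret i => (List.range N).foldl
        (fun ret j => ret.set i ((ret.getD i []).set j (cell ret i j + cell tmp i j))) ret) ret := rfl
  apply matExt
  · rw [hshow, ol, length_addMap]
  · intro i hi
    rw [hshow] at hi ⊢
    rw [ol] at hi
    rw [orr i, hr0 i hi, rlen_addMap N ret _ hi]
  · intro i j hi hj
    rw [hshow] at hi hj ⊢
    rw [ol] at hi
    rw [orr i, hr0 i hi] at hj
    rw [oc i j, cell_addMap N ret _ hi hj]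
    simp [hi, hj]

lemma Sq_addMap (N : Nat) (ret : List (List Int)) (f : Nat → Nat → Int) :
    Sq (addMap N ret f) N :=
  ⟨length_addMap N ret f, fun i hi => rlen_addMap N ret f hi⟩

lemma Sq_Rspec {m : List (List Int)} {N : Nat} (h : Sq m N) : Sq (Rspec m) N := by
  obtain ⟨hl, hr⟩ := h
  constructor
  · rw [length_Rspec, hl]
  · intro i hi
    rw [row_Rspec m (by omega)]
    simp [hl]

lemma Sq_iter {m : List (List Int)} {N : Nat} (h : Sq m N) (t : Nat) : Sq (Rspec^[t] m) N := by
  induction t with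
  | zero => exact h
  | succ t ih => rw [Function.iterate_succ_apply']; exact Sq_Rspec ih

lemma cell_Rspec2 {m : List (List Int)} {N : Nat} (h : Sq m N) {a b : Nat}
    (ha : a < N) (hb : b < N) :
    cell (Rspec (Rspec m)) a b = cell m (N - 1 - a) (N - 1 - b) := by
  have hm : m.length = N := h.1
  have hL : (Rspec m).length = N := by rw [length_Rspec, hm]
  rw [cell_Rspec (Rspec m) (by omega) (by omega)]
  rw [hL]
  rw [cell_Rspec m (by omega) (by omega), hm]

lemma Rspec4 {m : List (List Int)} {N : Nat} (h : Sq m N) : Rspec^[4] m = m := by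
  have h2 : Sq (Rspec (Rspec m)) N := Sq_Rspec (Sq_Rspec h)
  have e4 : Rspec^[4] m = Rspec (Rspec (Rspec (Rspec m))) := by
    simp [Function.iterate_succ_apply']
  rw [e4]
  apply matExt
  · rw [(Sq_Rspec (Sq_Rspec h2)).1, h.1]
  · intro i hi
    rw [(Sq_Rspec (Sq_Rspec h2)).1] at hi
    rw [(Sq_Rspec (Sq_Rspec h2)).2 i hi, h.2 i hi]
  · intro i j hi hj
    rw [(Sq_Rspec (Sq_Rspec h2)).1] at hi
    rw [(Sq_Rspec (Sq_Rspec h2)).2 i hi] at hj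
    rw [cell_Rspec2 h2 hi hj]
    rw [cell_Rspec2 h (by omega) (by omega)]
    congr 1 <;> omega

lemma iter_period {m : List (List Int)} {N : Nat} (h : Sq m N) (u : Nat) :
    Rspec^[u + 4] m = Rspec^[u] m := by
  rw [Function.iterate_add_apply, Rspec4 h]

lemma addMap_addMap (N : Nat) (ret : List (List Int)) (f g : Nat → Nat → Int) :
    addMap N (addMap N ret f) g = addMap N ret (fun i j => f i j + g i j) := by
  unfold addMap
  apply List.map_congr_left
  intro i hi
  have hi' : i < N := List.mem_range.mp hi
  apply List.map_congr_left
  intro j hj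
  have hj' : j < N := List.mem_range.mp hj
  rw [show cell ((List.range N).map (fun i => (List.range N).map (fun j => cell ret i j + f i j))) i j
      = cell (addMap N ret f) i j from rfl, cell_addMap N ret f hi' hj']
  ring

lemma addMap_congr (N : Nat) (ret : List (List Int)) (f g : Nat → Nat → Int)
    (h : ∀ i j, i < N → j < N → f i j = g i j) : addMap N ret f = addMap N ret g := by
  unfold addMap
  apply List.map_congr_left
  intro i hi
  apply List.map_congr_left
  intro j hj
  rw [h i j (List.mem_range.mp hi) (List.mem_range.mp hj)]

lemma addMap_zero (N : Nat) (ret : List (List Int)) (h : Sq ret N) :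
    addMap N ret (fun _ _ => 0) = ret := by
  apply matExt
  · rw [length_addMap, h.1]
  · intro i hi
    rw [length_addMap] at hi
    rw [rlen_addMap N ret _ hi, h.2 i hi]
  · intro i j hi hj
    rw [length_addMap] at hi
    rw [rlen_addMap N ret _ hi] at hj
    rw [cell_addMap N ret _ hi hj]
    ring

lemma solLoopA_char (N : Nat) (block : List (List Int)) (hb : Sq block N) :
    ∀ (k t : Nat) (ret : List (List Int)), Sq ret N →
      solLoopA N k ret (Rspec^[t] block)
        = addMap N ret (fun i j => ∑ u ∈ Finset.range k, cell (Rspec^[t + u + 1] block) i j) := by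
  intro k
  induction k with
  | zero =>
    intro t ret hsq
    rw [show solLoopA N 0 ret (Rspec^[t] block) = ret from rfl]
    rw [addMap_congr N ret _ (fun _ _ => 0) (by intro i j _ _; simp)]
    exact (addMap_zero N ret hsq).symm
  | succ k ih =>
    intro t ret hsq
    have hT' : rotateA (Rspec^[t] block) = Rspec^[t+1] block := by
      rw [rotateA_eq]
      exact (Function.iterate_succ_apply' Rspec t block).symm
    rw [show solLoopA N (k+1) ret (Rspec^[t] block)
        = solLoopA N k (addLoopA N ret (rotateA (Rspec^[t] block))) (rotateA (Rspec^[t] block)) from rfl]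
    rw [hT']
    rw [addLoopA_eq N ret _ hsq]
    rw [ih (t+1) _ (Sq_addMap N ret _)]
    rw [addMap_addMap]
    apply addMap_congr
    intro i j hi hj
    rw [Finset.sum_range_succ']
    have : (∑ u ∈ Finset.range k, cell (Rspec^[t + 1 + u + 1] block) i j)
        = ∑ u ∈ Finset.range k, cell (Rspec^[t + (u + 1) + 1] block) i j := by
      apply Finset.sum_congr rfl
      intro u _
      rw [show t + 1 + u + 1 = t + (u + 1) + 1 by omega]
    rw [this]
    rw [show t + 0 + 1 = t + 1 by omega]
    ring

lemma headD_eq_getD (l : List Int) (d : Int) : l.headD d = l.getD 0 d := by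
  cases l <;> simp [List.getD]

lemma tail_getD (l : List Int) (n : Nat) (d : Int) : l.tail.getD n d = l.getD (n+1) d := by
  cases l <;> simp [List.getD]

lemma zipStar_rect : ∀ (L : Nat) (m : List (List Int)), m ≠ [] →
    (∀ row ∈ m, row.length = L) →
    zipStar m = (List.range L).map (fun a => (List.range m.length).map (fun b => cell m b a)) := by
  intro L
  induction L with
  | zero =>
    intro m hm hrow
    rw [zipStar]
    rw [dif_neg (by
      intro ⟨h1, h2⟩
      cases m with
      | nil => exact hm rfl
      | cons a t =>
        have := hrow a (by simp)
        have := h2 a (by simp)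
        simp_all [List.length_eq_zero_iff])]
    simp
  | succ L ih =>
    intro m hm hrow
    rw [zipStar]
    rw [dif_pos (by
      refine ⟨hm, ?_⟩
      intro row hr
      have := hrow row hr
      intro hempty
      rw [hempty] at this
      simp at this)]
    have htne : m.map List.tail ≠ [] := by
      cases m with
      | nil => exact absurd rfl hm
      | cons a t => simp
    have htrow : ∀ row ∈ m.map List.tail, row.length = L := by
      intro row hr
      obtain ⟨row0, hr0, rfl⟩ := List.mem_map.mp hr
      have := hrow row0 hr0
      simp [this]
    rw [ih (m.map List.tail) htne htrow]
    rw [List.range_succ_eq_map]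
    rw [List.map_cons]
    congr 1
    · apply List.ext_getElem (by simp)
      intro b h1 h2
      simp only [List.getElem_map, List.getElem_range]
      have hb : b < m.length := by simpa using h1
      unfold cell
      rw [List.getD_eq_getElem m [] hb, headD_eq_getD]
    · rw [List.map_map]
      apply List.map_congr_left
      intro a _
      rw [show (m.map List.tail).length = m.length by simp]
      apply List.map_congr_left
      intro b hb
      have hb' : b < m.length := List.mem_range.mp hb
      unfold cell
      rw [List.getD_eq_getElem (m.map List.tail) _ (by simpa using hb')]
      rw [List.getD_eq_getElem m _ hb']
      simp only [List.getElem_map]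
      rw [tail_getD]

lemma zrot_eq_Rspec (m : List (List Int)) (N : Nat) (h : Sq m N) : zrotB m = Rspec m := by
  obtain ⟨hl, hr⟩ := h
  unfold zrotB
  by_cases hN0 : N = 0
  · have hm : m = [] := List.length_eq_zero_iff.mp (by omega)
    subst hm
    rw [zipStar]
    simp [Rspec]
  · have hmne : m.reverse ≠ [] := by
      intro hc
      have hme : m = [] := by simpa using hc
      rw [hme] at hl
      simp at hl
      omega
    have hrrow : ∀ row ∈ m.reverse, row.length = N := by
      intro row hrow
      rw [List.mem_reverse] at hrow
      obtain ⟨i, hi, rfl⟩ := List.mem_iff_getElem.mp hrow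
      have hgd : m.getD i [] = m[i] := List.getD_eq_getElem m [] hi
      rw [← hgd]
      exact hr i (by omega)
    rw [zipStar_rect N m.reverse hmne hrrow]
    unfold Rspec
    rw [List.length_reverse, hl]
    apply List.map_congr_left
    intro a _
    apply List.map_congr_left
    intro b hb
    have hb' : b < N := List.mem_range.mp hb
    unfold cell
    congr 1
    rw [List.getD_eq_getElem m.reverse _ (by simp only [List.length_reverse]; omega)]
    rw [List.getD_eq_getElem m _ (by omega)]
    rw [List.getElem_reverse]
    congr 1
    omega

lemma sum_period (e : Nat → Int) (hper : ∀ u, e (u + 4) = e u) :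
    ∀ (q t : Nat), (∑ u ∈ Finset.range (4 * q + t), e (u + 1))
      = q * (e 1 + e 2 + e 3 + e 4) + ∑ u ∈ Finset.range t, e (u + 1) := by
  have key : ∀ n, (∑ u ∈ Finset.range (n + 4), e (u + 1))
      = (∑ u ∈ Finset.range n, e (u + 1)) + (e 1 + e 2 + e 3 + e 4) := by
    intro n
    induction n with
    | zero =>
      simp [Finset.sum_range_succ]
      try ring
    | succ n ih =>
      rw [show n + 1 + 4 = (n + 4) + 1 by omega]
      rw [Finset.sum_range_succ, ih, Finset.sum_range_succ]
      rw [show n + 4 + 1 = (n + 1) + 4 by omega, hper (n+1)]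
      ring
  intro q
  induction q with
  | zero => intro t; simp
  | succ q ih =>
    intro t
    rw [show 4 * (q + 1) + t = (4 * q + t) + 4 by omega]
    rw [key, ih t]
    push_cast
    ring

theorem solution_spec : Claim_equal_solution := by
  unfold Claim_equal_solution
  intro stamp r _ hpre
  unfold Spec_solution
  obtain ⟨hr0, hrows⟩ := hpre
  set N := stamp.length with hN
  have hsq : Sq stamp N := by
    refine ⟨hN.symm, ?_⟩
    intro i hi
    have hi' : i < stamp.length := by omega
    rw [List.getD_eq_getElem stamp [] hi']
    exact hrows _ (List.getElem_mem hi')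
  set k := r.toNat with hk
  -- A-side closed form
  have hA : solution stamp r
      = addMap N stamp (fun i j => ∑ u ∈ Finset.range k, cell (Rspec^[u + 1] stamp) i j) := by
    rw [show solution stamp r = solLoopA N k stamp stamp from rfl]
    have := solLoopA_char N stamp hsq k 0 stamp hsq
    simp only [Function.iterate_zero, id_eq, Nat.zero_add] at this
    rw [this]
  -- B-side closed form
  have hB : solution_alt stamp r = addMap N stamp (fun i j =>
      PySem.Int.floordiv r 4 * (cell stamp i j + cell (zrotB stamp) i j
          + cell (zrotB (zrotB stamp)) i j + cell (zrotB (zrotB (zrotB stamp))) i j)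
      + (if 1 ≤ PySem.Int.mod r 4 then cell (zrotB stamp) i j else 0)
      + (if 2 ≤ PySem.Int.mod r 4 then cell (zrotB (zrotB stamp)) i j else 0)
      + (if 3 ≤ PySem.Int.mod r 4 then cell (zrotB (zrotB (zrotB stamp))) i j else 0)) := by
    rw [show solution_alt stamp r = (List.range N).map (fun i =>
      (List.range N).map (fun j =>
        cell stamp i j
          + PySem.Int.floordiv r 4 * (cell stamp i j + cell (zrotB stamp) i j
              + cell (zrotB (zrotB stamp)) i j + cell (zrotB (zrotB (zrotB stamp))) i j)
          + (if 1 ≤ PySem.Int.mod r 4 then cell (zrotB stamp) i j else 0)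
          + (if 2 ≤ PySem.Int.mod r 4 then cell (zrotB (zrotB stamp)) i j else 0)
          + (if 3 ≤ PySem.Int.mod r 4 then cell (zrotB (zrotB (zrotB stamp))) i j else 0))) from rfl]
    unfold addMap
    apply List.map_congr_left
    intro i _
    apply List.map_congr_left
    intro j _
    ring
  rw [hA, hB]
  apply addMap_congr
  intro i j hi hj
  have hz1 : zrotB stamp = Rspec^[1] stamp := by
    rw [Function.iterate_one]; exact zrot_eq_Rspec stamp N hsq
  have hz2 : zrotB (zrotB stamp) = Rspec^[2] stamp := by
    rw [hz1, zrot_eq_Rspec _ N (Sq_iter hsq 1)]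
    exact (Function.iterate_succ_apply' Rspec 1 stamp).symm
  have hz3 : zrotB (zrotB (zrotB stamp)) = Rspec^[3] stamp := by
    rw [hz2, zrot_eq_Rspec _ N (Sq_iter hsq 2)]
    exact (Function.iterate_succ_apply' Rspec 2 stamp).symm
  rw [hz3, hz2, hz1]
  have hper : ∀ u, cell (Rspec^[u + 4] stamp) i j = cell (Rspec^[u] stamp) i j := by
    intro u
    rw [iter_period hsq]
  have hkdecomp : k = 4 * (r / 4).toNat + (r % 4).toNat := by omega
  rw [hkdecomp, sum_period (fun u => cell (Rspec^[u] stamp) i j) hper]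
  have hq : PySem.Int.floordiv r 4 = r / 4 := PySem.Int.floordiv_eq_ediv_of_pos (by norm_num)
  have hs : PySem.Int.mod r 4 = r % 4 := PySem.Int.mod_eq_emod_of_pos (by norm_num)
  have hqc : ((r / 4).toNat : Int) = r / 4 := by omega
  have he40 : cell (Rspec^[4] stamp) i j = cell (Rspec^[0] stamp) i j := hper 0
  have hb0 : cell (Rspec^[0] stamp) i j = cell stamp i j := rfl
  rw [hq, hs]
  have hs4 : (r % 4).toNat = 0 ∨ (r % 4).toNat = 1 ∨ (r % 4).toNat = 2 ∨ (r % 4).toNat = 3 := by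
    omega
  rcases hs4 with h | h | h | h
  · have hs1 : ¬ (1:Int) ≤ r % 4 := by omega
    have hs2 : ¬ (2:Int) ≤ r % 4 := by omega
    have hs3 : ¬ (3:Int) ≤ r % 4 := by omega
    rw [h, if_neg hs1, if_neg hs2, if_neg hs3]
    simp only [Finset.sum_range_zero]
    rw [hqc, he40, hb0]
    ring
  · have hs1 : (1:Int) ≤ r % 4 := by omega
    have hs2 : ¬ (2:Int) ≤ r % 4 := by omega
    have hs3 : ¬ (3:Int) ≤ r % 4 := by omega
    rw [h, if_pos hs1, if_neg hs2, if_neg hs3]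
    simp only [Finset.sum_range_succ, Finset.sum_range_zero, Nat.zero_add]
    rw [hqc, he40, hb0]
    ring
  · have hs1 : (1:Int) ≤ r % 4 := by omega
    have hs2 : (2:Int) ≤ r % 4 := by omega
    have hs3 : ¬ (3:Int) ≤ r % 4 := by omega
    rw [h, if_pos hs1, if_pos hs2, if_neg hs3]
    simp only [Finset.sum_range_succ, Finset.sum_range_zero, Nat.zero_add]
    rw [hqc, he40, hb0]
    ring
  · have hs1 : (1:Int) ≤ r % 4 := by omega
    have hs2 : (2:Int) ≤ r % 4 := by omega
    have hs3 : (3:Int) ≤ r % 4 := by omega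
    rw [h, if_pos hs1, if_pos hs2, if_pos hs3]
    simp only [Finset.sum_range_succ, Finset.sum_range_zero, Nat.zero_add]
    rw [hqc, he40, hb0]
    ring
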